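-- pv_equiv track=rewrite | github.com/frankligy/exercise_codes | branch2.py | check_exonlist_stra1
-- ===== SOURCE A (Python) =====
-- def check_exonlist_stra1(exonlist,index):
--     dict = {}
--     for subexon in exonlist:
--         exon_num = subexon.split('.')[0]
--         if exon_num in dict:
--             dict[exon_num].append(subexon)
--         else:
--             dict[exon_num] = []
--             dict[exon_num].append(subexon)
--     # check
--     query = exonlist[index]
--     if len(dict[query.split('.')[0]]) == 1:
--         return True
--     else:
--         if query == dict[query.split('.')[0]][0]:
--             return True
--         else:
--             return False
-- ===== SOURCE B (Python) =====
-- def check_exonlist_stra1(exonlist, index):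
--     query = exonlist[index]
--     prefix = query.split('.')[0]
--     for subexon in exonlist:
--         if subexon.split('.')[0] == prefix:
--             return subexon == query
-- ===== Notes on version B (the rewrite author's own statement) =====
-- stated objective: simpler
-- what changed: B builds no grouping dict: it takes the query's prefix and early-exits at the first list element with that prefix, comparing it to the query, instead of indexing the whole list by prefix and looking the group up.
import Mathlib
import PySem

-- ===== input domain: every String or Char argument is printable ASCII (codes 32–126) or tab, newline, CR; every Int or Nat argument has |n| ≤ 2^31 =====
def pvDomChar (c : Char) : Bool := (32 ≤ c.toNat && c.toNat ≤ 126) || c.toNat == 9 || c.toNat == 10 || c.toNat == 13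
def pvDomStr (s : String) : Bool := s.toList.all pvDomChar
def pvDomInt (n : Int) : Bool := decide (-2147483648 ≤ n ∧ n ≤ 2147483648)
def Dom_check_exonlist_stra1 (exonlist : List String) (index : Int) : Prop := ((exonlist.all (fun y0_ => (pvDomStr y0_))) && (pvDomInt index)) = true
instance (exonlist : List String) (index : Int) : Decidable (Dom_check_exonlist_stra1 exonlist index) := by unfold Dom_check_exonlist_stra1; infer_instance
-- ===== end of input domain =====

-- B drops A's prefix-keyed grouping dict entirely: it early-exits at the first element sharing
-- the query's prefix and compares it with the query (objective: simpler).

-- ===== PORT A =====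
-- subexon.split('.')[0]  (split? is some for the nonempty separator "."; the result is never
-- empty, so the defaults are never used — exact for Python's .split('.')[0])
def pfxOf (s : String) : String := ((PySem.Str.split? s ".").getD []).headD ""

-- one iteration of A's dict-building loop
def buildStep (d : PySem.Dict String (List String)) (subexon : String) : PySem.Dict String (List String) :=
  let exon_num := pfxOf subexon
  match d.get? exon_num with
  | some l => d.insert exon_num (l ++ [subexon])
  | none   => d.insert exon_num ([] ++ [subexon])

def check_exonlist_stra1 (exonlist : List String) (index : Int) : Bool :=
  let d := exonlist.foldl buildStep PySem.Dict.empty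
  match PySem.List.pyGet? exonlist index with
  | none => false  -- IndexError: exonlist[index] raises; outside Pre_
  | some query =>
    let g := (d.get? (pfxOf query)).getD []   -- dict[...]: key always present (query ∈ exonlist)
    if g.length == 1 then true
    else if query == g.headD "" then true else false

-- ===== PORT B =====
-- B's loop: return (subexon == query) at the first subexon whose prefix matches
def firstMatch (xs : List String) (p q : String) : Bool :=
  match xs with
  | [] => false
  | s :: rest => if pfxOf s == p then s == q else firstMatch rest p q

def check_exonlist_stra1_alt (exonlist : List String) (index : Int) : Bool :=
  match PySem.List.pyGet? exonlist index with
  | none => false  -- IndexError, outside Pre_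
  | some query => firstMatch exonlist (pfxOf query) query

-- ===== PRECONDITION & SPEC =====
-- Pre_ excludes exactly the inputs where exonlist[index] raises IndexError (in both A and B).
def Pre_check_exonlist_stra1 (exonlist : List String) (index : Int) : Prop :=
  PySem.Raise.InRange exonlist.length index
instance (exonlist : List String) (index : Int) : Decidable (Pre_check_exonlist_stra1 exonlist index) := by unfold Pre_check_exonlist_stra1; infer_instance

def pvWitness_check_exonlist_stra1 : List String × Int := (["1.1", "1.2", "2.1"], 1)

def Spec_check_exonlist_stra1 (exonlist : List String) (index : Int) (out : Bool) : Prop := out = check_exonlist_stra1_alt exonlist index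
instance (exonlist : List String) (index : Int) (out : Bool) : Decidable (Spec_check_exonlist_stra1 exonlist index out) := by unfold Spec_check_exonlist_stra1; infer_instance

-- ===== CLAIM (what is proved, stated in full; the proofs are below) =====
def Claim_equal_check_exonlist_stra1 : Prop := ∀ (exonlist : List String) (index : Int), Dom_check_exonlist_stra1 exonlist index → Pre_check_exonlist_stra1 exonlist index → Spec_check_exonlist_stra1 exonlist index (check_exonlist_stra1 exonlist index)

-- ===== LEMMAS AND PROOFS =====

-- what A's dict contains at key k after folding over xs starting from d
lemma build_get? (xs : List String) (d : PySem.Dict String (List String)) (k : String) :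
    (xs.foldl buildStep d).get? k =
      match d.get? k with
      | some l => some (l ++ xs.filter (fun s => pfxOf s == k))
      | none   => if (xs.filter (fun s => pfxOf s == k)).isEmpty then none
                  else some (xs.filter (fun s => pfxOf s == k)) := by
  induction xs generalizing d with
  | nil => cases h : d.get? k <;> simp [h]
  | cons x xs ih =>
    simp only [List.foldl_cons, ih (buildStep d x), List.filter_cons]
    by_cases hx : pfxOf x = k
    · subst hx
      cases h : d.get? (pfxOf x) with
      | none =>
        simp [buildStep, h, PySem.Dict.get?_insert_self]
      | some l =>
        simp [buildStep, h, PySem.Dict.get?_insert_self]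
    · have hne : k ≠ pfxOf x := fun h => hx h.symm
      have hbx : (pfxOf x == k) = false := by simp [hx]
      cases h : d.get? (pfxOf x) with
      | none =>
        simp [buildStep, h, PySem.Dict.get?_insert_of_ne _ _ hne, hbx]
      | some l =>
        simp [buildStep, h, PySem.Dict.get?_insert_of_ne _ _ hne, hbx]

-- what B's loop computes: compare the first filter hit against q
lemma firstMatch_eq (xs : List String) (p q : String) :
    firstMatch xs p q =
      match xs.filter (fun s => pfxOf s == p) with
      | [] => false
      | h :: _ => h == q := by
  induction xs with
  | nil => simp [firstMatch]
  | cons x xs ih =>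
    by_cases hx : pfxOf x = p
    · simp [firstMatch, hx]
    · simp [firstMatch, hx, ih]

lemma build_get?_empty (xs : List String) (k : String) :
    ((xs.foldl buildStep PySem.Dict.empty).get? k) =
      if (xs.filter (fun s => pfxOf s == k)).isEmpty then none
      else some (xs.filter (fun s => pfxOf s == k)) := by
  rw [build_get?, PySem.Dict.get?_empty]

theorem check_exonlist_stra1_spec_aux (exonlist : List String) (index : Int)
    (hpre : Pre_check_exonlist_stra1 exonlist index) :
    check_exonlist_stra1 exonlist index = check_exonlist_stra1_alt exonlist index := by
  obtain ⟨query, hq⟩ : ∃ q, PySem.List.pyGet? exonlist index = some q := by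
    cases h : PySem.List.pyGet? exonlist index with
    | none => exact absurd hpre ((PySem.List.pyGet?_eq_none_iff exonlist index).mp h)
    | some q => exact ⟨q, rfl⟩
  have hmem : query ∈ exonlist := PySem.List.mem_of_pyGet?_eq_some _ hq
  have hmemf : query ∈ exonlist.filter (fun s => pfxOf s == pfxOf query) := by
    simp [List.mem_filter, hmem]
  unfold check_exonlist_stra1 check_exonlist_stra1_alt
  rw [hq]
  dsimp only
  rw [firstMatch_eq, build_get?_empty]
  obtain ⟨h, t, hf⟩ : ∃ h t, exonlist.filter (fun s => pfxOf s == pfxOf query) = h :: t := by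
    cases hf : exonlist.filter (fun s => pfxOf s == pfxOf query) with
    | nil => rw [hf] at hmemf; simp at hmemf
    | cons h t => exact ⟨h, t, rfl⟩
  rw [hf] at hmemf ⊢
  simp only [List.isEmpty_cons, Bool.false_eq_true, if_false, Option.getD_some, List.headD_cons]
  cases t with
  | nil =>
    have hqh : query = h := by simpa using hmemf
    subst hqh; simp
  | cons y t' =>
    have hl : ((h :: y :: t').length == 1) = false := by simp
    simp only [hl, Bool.false_eq_true, if_false]
    by_cases hqe : query = h
    · subst hqe; simp
    · simp [beq_iff_eq, hqe, Ne.symm hqe]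

-- ===== VERDICT (by name: the statement is the Claim_ definition above) =====
theorem check_exonlist_stra1_spec : Claim_equal_check_exonlist_stra1 := by
  intro exonlist index _ hpre
  unfold Spec_check_exonlist_stra1
  exact check_exonlist_stra1_spec_aux exonlist index hpre
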